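-- pv_equiv track=rewrite | github.com/ipinmi/tagTeam | bilstm_crf/data.py | tag_distribution
-- ===== SOURCE A (Python) =====
-- from collections import defaultdict
--
-- def tag_distribution(tag_sequences):
--     """
--     Returns the distribution of the tags in the data in the following format:
--     {tag1: count1, tag2: count2, ...}
--     """
--     tag_distribution = defaultdict(int)
--     for tag in tag_sequences:
--         if tag in tag_distribution:
--             tag_distribution[tag] += 1
--         else:
--             tag_distribution[tag] = 1
--     return dict(sorted(tag_distribution.items()))
-- ===== SOURCE B (Python) =====
-- def tag_distribution(tag_sequences):
--     """
--     Returns the distribution of the tags in the data in the following format: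
--     {tag1: count1, tag2: count2, ...}
--     Sorts the tags first, then counts each run of consecutive equal tags,
--     so the keys come out already in sorted order.
--     """
--     tags = sorted(tag_sequences)
--     dist = {}
--     i = 0
--     n = len(tags)
--     while i < n:
--         j = i + 1
--         while j < n and tags[j] == tags[i]:
--             j += 1
--         dist[tags[i]] = j - i
--         i = j
--     return dist
-- ===== Notes on version B (the rewrite author's own statement) =====
-- stated objective: alternative
-- what changed: Replaces the hash-count-then-sort-the-items strategy by sort-the-data-first and one grouping pass over runs of equal tags, which yields the keys already in sorted order.
import Mathlib
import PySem

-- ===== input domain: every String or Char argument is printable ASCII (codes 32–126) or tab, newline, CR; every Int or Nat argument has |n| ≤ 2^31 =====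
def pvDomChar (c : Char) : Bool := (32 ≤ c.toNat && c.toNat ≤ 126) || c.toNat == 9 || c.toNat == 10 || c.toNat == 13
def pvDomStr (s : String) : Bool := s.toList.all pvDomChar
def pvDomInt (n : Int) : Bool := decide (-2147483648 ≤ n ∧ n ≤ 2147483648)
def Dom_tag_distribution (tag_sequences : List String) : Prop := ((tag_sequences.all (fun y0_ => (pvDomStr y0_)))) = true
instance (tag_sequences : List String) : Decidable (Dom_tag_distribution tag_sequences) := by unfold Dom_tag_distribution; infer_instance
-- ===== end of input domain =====

-- B sorts the tag list first and counts runs of consecutive equal tags in one grouping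
-- pass (keys come out already sorted), instead of A's hash-count-then-sort-the-items.


-- ===== PORT A =====
-- counter dict built by the loop (if tag in d: d[tag] += 1 else: d[tag] = 1),
-- then dict(sorted(d.items())): pairs sorted lexicographically = sorted2 fst snd
def tag_distribution (tag_sequences : List String) : List (String × Int) :=
  let d := tag_sequences.foldl
    (fun d tag => if d.contains tag then d.modify tag 0 (· + 1) else d.insert tag 1)
    PySem.Dict.empty
  PySem.List.sorted2 d.items Prod.fst Prod.snd false

-- ===== PORT B =====
-- grouping pass over the sorted list: each step consumes one run of equal tags
-- (the inner while loop of Source B) and records (tag, run length)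
def pvRuns : List String → List (String × Int)
  | [] => []
  | t :: rest =>
    (t, (1 + (rest.takeWhile (fun x => x == t)).length : Int)) ::
      pvRuns (rest.dropWhile (fun x => x == t))
termination_by xs => xs.length
decreasing_by
  exact Nat.lt_succ_of_le (List.Sublist.length_le (List.dropWhile_sublist _))

def tag_distribution_alt (tag_sequences : List String) : List (String × Int) :=
  pvRuns (PySem.List.sorted tag_sequences (fun x => x) false)

-- ===== PRECONDITION & SPEC =====
def Spec_tag_distribution (tag_sequences : List String) (out : List (String × Int)) : Prop := out = tag_distribution_alt tag_sequences
instance (tag_sequences : List String) (out : List (String × Int)) : Decidable (Spec_tag_distribution tag_sequences out) := by unfold Spec_tag_distribution; infer_instance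

-- ===== CLAIM (what is proved, stated in full; the proofs are below) =====
def Claim_equal_tag_distribution : Prop := ∀ (tag_sequences : List String), Dom_tag_distribution tag_sequences → Spec_tag_distribution tag_sequences (tag_distribution tag_sequences)

-- ===== LEMMAS AND PROOFS =====

-- lexicographic ≤ on (String × Int), the order sorted2 fst snd establishes
def pvLexLe (a b : String × Int) : Prop := a.1 < b.1 ∨ (a.1 = b.1 ∧ a.2 ≤ b.2)

theorem pvLexLe_trans {a b c : String × Int} (h1 : pvLexLe a b) (h2 : pvLexLe b c) : pvLexLe a c := by
  rcases h1 with h1 | ⟨e1, l1⟩ <;> rcases h2 with h2 | ⟨e2, l2⟩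
  · exact Or.inl (h1.trans h2)
  · exact Or.inl (e2 ▸ h1)
  · exact Or.inl (e1 ▸ h2)
  · exact Or.inr ⟨e1.trans e2, l1.trans l2⟩

theorem pv_before_true {a b : String × Int}
    (h : (decide (a.1 < b.1) || !decide (b.1 < a.1) && decide (a.2 < b.2)) = true) : pvLexLe a b := by
  simp only [Bool.or_eq_true, Bool.and_eq_true, Bool.not_eq_true', decide_eq_true_eq,
    decide_eq_false_iff_not] at h
  rcases h with h | ⟨h1, h2⟩
  · exact Or.inl h
  · rcases lt_or_eq_of_le (not_lt.mp h1) with hlt | he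
    · exact Or.inl hlt
    · exact Or.inr ⟨he, le_of_lt h2⟩

theorem pv_before_false {a b : String × Int}
    (h : (decide (a.1 < b.1) || !decide (b.1 < a.1) && decide (a.2 < b.2)) = false) : pvLexLe b a := by
  simp only [Bool.or_eq_false_iff, Bool.and_eq_false_iff, Bool.not_eq_false', decide_eq_true_eq,
    decide_eq_false_iff_not] at h
  obtain ⟨h1, h2⟩ := h
  rcases lt_or_eq_of_le (not_lt.mp h1) with hlt | he
  · exact Or.inl hlt
  · rcases h2 with h2 | h2
    · exact Or.inl h2
    · exact Or.inr ⟨he, not_lt.mp h2⟩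

theorem pv_insertBy_lex_pairwise (x : String × Int) (ys : List (String × Int))
    (h : ys.Pairwise pvLexLe) :
    (PySem.List.insertBy
      (fun a b => decide (a.1 < b.1) || !decide (b.1 < a.1) && decide (a.2 < b.2)) x ys).Pairwise pvLexLe := by
  induction ys with
  | nil => simp [PySem.List.insertBy]
  | cons y ys ih =>
    rw [PySem.List.insertBy.eq_2]
    rcases List.pairwise_cons.mp h with ⟨hy, hys⟩
    by_cases hb : (decide (x.1 < y.1) || !decide (y.1 < x.1) && decide (x.2 < y.2)) = true
    · simp only [hb]
      refine List.pairwise_cons.mpr ⟨?_, h⟩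
      intro z hz
      rcases hz with _ | hz
      · exact pv_before_true hb
      · exact pvLexLe_trans (pv_before_true hb) (hy _ (by assumption))
    · rw [if_neg hb]
      refine List.pairwise_cons.mpr ⟨?_, ih hys⟩
      intro z hz
      rcases (PySem.List.mem_insertBy _ _ _ _).mp hz with rfl | hz
      · exact pv_before_false (Bool.eq_false_iff.mpr hb)
      · exact hy _ hz

theorem pv_sorted2_pairwise (xs : List (String × Int)) :
    (PySem.List.sorted2 xs Prod.fst Prod.snd false).Pairwise pvLexLe := by
  have key : ∀ (l : List (String × Int)) (acc : List (String × Int)), acc.Pairwise pvLexLe →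
      (l.foldl (fun acc x => PySem.List.insertBy
        (fun a b => decide (a.1 < b.1) || !decide (b.1 < a.1) && decide (a.2 < b.2)) x acc) acc).Pairwise pvLexLe := by
    intro l
    induction l with
    | nil => intro acc h; exact h
    | cons x l ih => intro acc h; exact ih _ (pv_insertBy_lex_pairwise x acc h)
  simpa [PySem.List.sorted2] using key xs [] (by simp)

-- A's loop body is exactly Counter's update step
theorem pv_step_eq (d : PySem.Dict String Int) (t : String) :
    (if d.contains t then d.modify t 0 (· + 1) else d.insert t 1) = d.modify t 0 (· + 1) := by
  by_cases h : d.contains t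
  · simp [h]
  · have h0 : d.getD t 0 = 0 := by
      have := (PySem.Dict.get?_eq_none_iff_contains d t).mpr (by simpa using h)
      simp [PySem.Dict.getD, this]
    simp [h, PySem.Dict.modify, h0]

theorem pv_foldA_eq_counter (xs : List String) :
    xs.foldl (fun d tag => if d.contains tag then d.modify tag 0 (· + 1) else d.insert tag 1)
      PySem.Dict.empty = PySem.Dict.counter xs := by
  rw [PySem.Dict.counter_eq_foldl]
  exact PySem.List.foldl_congr_mem _ _ _ _ (fun d tag _ => pv_step_eq d tag)

-- everything after the leading run of t's in a sorted list is strictly greater than t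
theorem pv_dropWhile_gt (t : String) (rest : List String)
    (hp : rest.Pairwise (· ≤ ·)) (hle : ∀ a ∈ rest, t ≤ a) :
    ∀ a ∈ rest.dropWhile (fun x => x == t), t < a := by
  induction rest with
  | nil => simp
  | cons r rs ih =>
    rcases List.pairwise_cons.mp hp with ⟨hr, hrs⟩
    by_cases hrt : (r == t) = true
    · simp only [List.dropWhile_cons, hrt, if_true]
      exact ih hrs (fun a ha => hle a (by simp [ha]))
    · simp only [List.dropWhile_cons, hrt]
      have hne : r ≠ t := by simpa using hrt
      have hlt : t < r := lt_of_le_of_ne (hle r (by simp)) (Ne.symm hne)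
      intro a ha
      rcases ha with _ | ha
      · exact hlt
      · exact lt_of_lt_of_le hlt (hr a (by assumption))

theorem pv_foldl_add_mem (l : List String) (s : PySem.Set String)
    (h : ∀ a ∈ l, a ∈ s) : l.foldl PySem.Set.add s = s := by
  induction l with
  | nil => rfl
  | cons x l ih =>
    have hx : PySem.Set.add s x = s := by
      simp [PySem.Set.add, PySem.Set.contains, h x (by simp)]
    simp only [List.foldl_cons, hx]
    exact ih (fun a ha => h a (by simp [ha]))

theorem pv_foldl_add_cons (l : List String) (s : List String) (t : String) (h : t ∉ l) :
    l.foldl PySem.Set.add (t :: s) = t :: l.foldl PySem.Set.add s := by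
  induction l generalizing s with
  | nil => rfl
  | cons x l ih =>
    have hxt : x ≠ t := fun e => h (by simp [e])
    have hstep : PySem.Set.add (t :: s) x = t :: PySem.Set.add s x := by
      by_cases hm : x ∈ s <;> simp [PySem.Set.add, PySem.Set.contains, hxt, hm]
    simp only [List.foldl_cons, hstep]
    exact ih _ (fun e => h (by simp [e]))

theorem pv_ofList_sublist (l : List String) (s : List String) :
    (l.foldl PySem.Set.add s).Sublist (s ++ l) := by
  induction l generalizing s with
  | nil => simp
  | cons x l ih =>
    have h1 : (PySem.Set.add s x).Sublist (s ++ [x]) := by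
      by_cases hm : x ∈ s <;> simp [PySem.Set.add, PySem.Set.contains, hm]
    have h2 : ((x :: l).foldl PySem.Set.add s) = l.foldl PySem.Set.add (PySem.Set.add s x) := rfl
    rw [h2]
    exact (ih (PySem.Set.add s x)).trans
      (by simpa using List.Sublist.append_right h1 l)

-- B on a sorted list is the deduplicated list of tags paired with their counts
theorem pv_runs_eq (ys : List String) (h : ys.Pairwise (· ≤ ·)) :
    pvRuns ys = (PySem.List.dedup ys).map (fun k => (k, (ys.count k : Int))) := by
  induction ys using pvRuns.induct with
  | case1 => simp [pvRuns, PySem.List.dedup, PySem.Set.ofList]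
  | case2 t rest ih =>
    rcases List.pairwise_cons.mp h with ⟨hle, hrest⟩
    set same := rest.takeWhile (fun x => x == t) with hsame
    set more := rest.dropWhile (fun x => x == t) with hmore
    have hsplit : rest = same ++ more := (List.takeWhile_append_dropWhile).symm
    have hsame_eq : ∀ a ∈ same, a = t := by
      intro a ha
      have := List.mem_takeWhile_imp ha
      simpa using this
    have hgt : ∀ a ∈ more, t < a := pv_dropWhile_gt t rest hrest hle
    have htnot : t ∉ more := fun hm => lt_irrefl t (hgt t hm)
    have hmore_pair : more.Pairwise (· ≤ ·) := hrest.sublist (List.dropWhile_sublist _)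
    have hdedup : PySem.List.dedup (t :: rest) = t :: PySem.List.dedup more := by
      rw [PySem.List.dedup_eq_ofList, PySem.List.dedup_eq_ofList]
      show (t :: rest).foldl PySem.Set.add [] = t :: more.foldl PySem.Set.add []
      rw [List.foldl_cons]
      have h0 : PySem.Set.add ([] : PySem.Set String) t = [t] := rfl
      rw [h0, hsplit, List.foldl_append]
      rw [pv_foldl_add_mem same [t] (fun a ha => by simp [hsame_eq a ha])]
      exact pv_foldl_add_cons more [] t htnot
    have hcount_t : ((t :: rest).count t : Int) = 1 + (same.length : Int) := by
      rw [hsplit]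
      have h1 : same.count t = same.length := by
        rw [List.count_eq_length]
        intro b hb
        exact (hsame_eq b hb).symm
      have h2 : more.count t = 0 := List.count_eq_zero.mpr htnot
      simp [List.count_append, h1, h2]
      omega
    have hcount_k : ∀ k ∈ PySem.List.dedup more, ((t :: rest).count k : Int) = (more.count k : Int) := by
      intro k hk
      have hkm : k ∈ more := (PySem.List.mem_dedup _ _).mp hk
      have hkt : k ≠ t := fun e => lt_irrefl t (e ▸ hgt k hkm)
      have h1 : same.count k = 0 := List.count_eq_zero.mpr (fun hks => hkt (hsame_eq k hks))
      rw [hsplit]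
      simp [List.count_append, List.count_cons, h1]
      exact fun e => hkt e.symm
    rw [pvRuns, hdedup, List.map_cons]
    congr 1
    · exact congrArg (fun z => (t, z)) hcount_t.symm
    · rw [ih hmore_pair]
      exact List.map_congr_left (fun k hk => by rw [← hcount_k k hk])

theorem pv_main (xs : List String) : tag_distribution xs = tag_distribution_alt xs := by
  have hys : (PySem.List.sorted xs (fun x => x) false).Pairwise (· ≤ ·) := by
    simpa using PySem.List.sorted_pairwise xs (fun x => x)
  set ys := PySem.List.sorted xs (fun x => x) false with hysdef
  have hperm_ys : ys.Perm xs := PySem.List.sorted_perm xs (fun x => x) false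
  have hcount : ∀ k, (ys.count k : Int) = (xs.count k : Int) := fun k => by
    rw [hperm_ys.count_eq]
  have hW : tag_distribution_alt xs
      = (PySem.List.dedup ys).map (fun k => (k, (xs.count k : Int))) := by
    rw [tag_distribution_alt, ← hysdef, pv_runs_eq ys hys]
    exact List.map_congr_left (fun k _ => by rw [hcount])
  have hsub : (PySem.List.dedup ys).Sublist ys := by
    rw [PySem.List.dedup_eq_ofList]
    simpa using pv_ofList_sublist ys []
  have hnd : (PySem.List.dedup ys).Nodup := PySem.List.nodup_dedup ys
  have hdlt : (PySem.List.dedup ys).Pairwise (· < ·) := by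
    have h1 : (PySem.List.dedup ys).Pairwise (· ≤ ·) := hys.sublist hsub
    have h2 : (PySem.List.dedup ys).Pairwise (· ≠ ·) := hnd
    exact (h1.and h2).imp (fun h => lt_of_le_of_ne h.1 h.2)
  have hpermd : (PySem.List.dedup ys).Perm (PySem.Set.ofList xs) := by
    refine (List.perm_ext_iff_of_nodup hnd (PySem.Set.nodup_ofList xs)).mpr (fun a => ?_)
    rw [PySem.List.mem_dedup, ← PySem.List.dedup_eq_ofList, PySem.List.mem_dedup]
    exact ⟨fun h => hperm_ys.mem_iff.mp h, fun h => hperm_ys.mem_iff.mpr h⟩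
  have hA : tag_distribution xs
      = PySem.List.sorted2 ((PySem.Set.ofList xs).map (fun k => (k, (xs.count k : Int))))
          Prod.fst Prod.snd false := by
    rw [tag_distribution, pv_foldA_eq_counter, PySem.Dict.items_counter]
  have hpermZ : (tag_distribution_alt xs).Perm
      ((PySem.Set.ofList xs).map (fun k => (k, (xs.count k : Int)))) := by
    rw [hW]; exact hpermd.map _
  have hpermAB : (tag_distribution xs).Perm (tag_distribution_alt xs) := by
    rw [hA]
    exact (PySem.List.sorted2_perm _ _ _ _).trans hpermZ.symm
  have hBfst : (tag_distribution_alt xs).Pairwise (fun a b => a.1 < b.1) := by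
    rw [hW, List.pairwise_map]
    exact hdlt
  have hAfst : (tag_distribution xs).Pairwise (fun a b => a.1 < b.1) := by
    have hlex : (tag_distribution xs).Pairwise pvLexLe := by
      rw [hA]; exact pv_sorted2_pairwise _
    have hndfst : ((tag_distribution xs).map Prod.fst).Nodup := by
      have hB : ((tag_distribution_alt xs).map Prod.fst).Nodup := by
        rw [hW, List.map_map]
        have he : (Prod.fst ∘ fun k => (k, (xs.count k : Int))) = id := rfl
        rw [he, List.map_id]
        exact hnd
      exact (hpermAB.map Prod.fst).symm.nodup_iff.mp hB
    have hne : (tag_distribution xs).Pairwise (fun a b => a.1 ≠ b.1) := by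
      rw [List.nodup_iff_pairwise_ne, List.pairwise_map] at hndfst
      exact hndfst
    exact (hlex.and hne).imp (fun h => by
      rcases h.1 with h1 | ⟨h1, _⟩
      · exact h1
      · exact absurd h1 h.2)
  exact hpermAB.eq_of_pairwise (fun a b _ _ h1 h2 => absurd h2 (lt_asymm h1)) hAfst hBfst

-- ===== VERDICT (by name: the statement is the Claim_ definition above) =====
theorem tag_distribution_spec : Claim_equal_tag_distribution := by
  intro xs _
  exact pv_main xs
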